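-- pv_equiv track=rewrite | github.com/LolSayna/LearningPatternsfromTextualData | src/patternUtil.py | findAllNonVariables
-- ===== SOURCE A (Python) =====
-- def isVariable(i):
--     # as defined in the Int Array, an even number is a variable
--     return i % 2 == 0
--
-- def findAllNonVariables(pattern):
--     # aka the maximal terminal factors
--     # finds all the parts of the pattern that are not variables, including the suffix and prefix seperated
--     # pattern -> list of words(string)
--
--     words = []
--     prefix = []
--     suffix = []
--     w = []
--
--     i = 0
--     while i < len(pattern) and not isVariable(pattern[i]):
--         prefix.append(pattern[i])
--         i += 1
--
--     for c in pattern[len(prefix) :]: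
--         if isVariable(c):
--             if w:
--                 words.append(w)
--                 w = []
--         else:
--             w.append(c)
--
--     suffix = w
--
--     return words, prefix, suffix
-- ===== SOURCE B (Python) =====
-- def isVariable(i):
--     # as defined in the Int Array, an even number is a variable
--     return i % 2 == 0
--
-- def findAllNonVariables(pattern):
--     # one pass: cut the pattern into maximal runs of equal isVariable-ness,
--     # then read prefix/suffix/words straight off the run list
--     groups = []
--     i = 0
--     n = len(pattern)
--     while i < n:
--         k = isVariable(pattern[i])
--         j = i + 1
--         while j < n and isVariable(pattern[j]) == k:
--             j += 1
--         groups.append((k, pattern[i:j]))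
--         i = j
--
--     prefix = groups[0][1] if groups and not groups[0][0] else []
--     suffix = groups[-1][1] if len(groups) > 1 and not groups[-1][0] else []
--     start = 1 if prefix else 0
--     stop = len(groups) - 1 if suffix else len(groups)
--     words = [run for k, run in groups[start:stop] if not k]
--     return words, prefix, suffix
-- ===== Notes on version B (the rewrite author's own statement) =====
-- stated objective: idiomatic
-- what changed: B replaces A's two-phase scan (a prefix while-loop plus a stateful fold carrying a pending word) by one groupby-style pass that cuts the pattern into maximal parity runs and then reads prefix, suffix and words directly off the run list.
import Mathlib
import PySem

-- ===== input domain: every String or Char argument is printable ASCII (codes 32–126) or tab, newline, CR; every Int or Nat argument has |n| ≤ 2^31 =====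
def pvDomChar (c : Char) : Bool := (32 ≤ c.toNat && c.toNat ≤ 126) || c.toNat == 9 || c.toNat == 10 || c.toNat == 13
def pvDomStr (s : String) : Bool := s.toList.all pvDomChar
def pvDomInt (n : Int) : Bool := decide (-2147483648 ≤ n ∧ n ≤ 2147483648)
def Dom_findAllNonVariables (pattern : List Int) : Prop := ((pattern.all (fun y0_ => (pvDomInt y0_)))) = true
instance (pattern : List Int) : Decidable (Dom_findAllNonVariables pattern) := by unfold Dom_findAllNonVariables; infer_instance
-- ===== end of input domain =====

-- B cuts the pattern into maximal parity runs in one pass and reads prefix/suffix/words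
-- off the run list (idiomatic decomposition; same O(n) cost as A).

-- ===== PORT A =====

-- shared module-level helper `isVariable` (both Pythons use it)
def isVariable (i : Int) : Bool := PySem.Int.mod i 2 == 0

-- A's initial `while` loop, collecting the leading non-variable elements
def pvPrefixA : List Int → List Int
  | [] => []
  | c :: t => if isVariable c then [] else c :: pvPrefixA t

-- the body of A's `for c in pattern[len(prefix):]` loop, state = (words, w)
def stepA (st : List (List Int) × List Int) (c : Int) : List (List Int) × List Int :=
  if isVariable c then
    if st.2 = [] then st else (st.1 ++ [st.2], [])
  else (st.1, st.2 ++ [c])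

def findAllNonVariables (pattern : List Int) : List (List Int) × List Int × List Int :=
  let pref := pvPrefixA pattern
  let st := (pattern.drop pref.length).foldl stepA ([], [])  -- pattern[len(prefix):]
  (st.1, pref, st.2)

-- ===== PORT B =====

-- B's outer while loop: each step takes one maximal run pattern[i:j] of equal
-- isVariable-ness (the inner `while j < n` scan = takeWhile/dropWhile, exact)
def groupRuns : List Int → List (Bool × List Int)
  | [] => []
  | c :: t =>
    (isVariable c, c :: t.takeWhile (fun x => isVariable x == isVariable c))
      :: groupRuns (t.dropWhile (fun x => isVariable x == isVariable c))
termination_by l => l.length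
decreasing_by
  have := List.length_dropWhile_le (fun x => isVariable x == isVariable c) t
  simp; omega

def findAllNonVariables_alt (pattern : List Int) : List (List Int) × List Int × List Int :=
  let gs := groupRuns pattern
  let pre := match gs.head? with | some (false, r) => r | _ => ([] : List Int)
  let suf := if 1 < gs.length then
               (match gs.getLast? with | some (false, r) => r | _ => ([] : List Int))
             else []
  let start := if pre.isEmpty then 0 else 1
  let stop := if suf.isEmpty then gs.length else gs.length - 1
  -- groups[start:stop] with 0 ≤ start ≤ stop bounded by len: exact as drop/take
  let words := ((gs.drop start).take (stop - start)).filterMap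
                 (fun g => if g.1 then none else some g.2)
  (words, pre, suf)

-- ===== PRECONDITION & SPEC =====
def Spec_findAllNonVariables (pattern : List Int) (out : List (List Int) × List Int × List Int) : Prop := out = findAllNonVariables_alt pattern
instance (pattern : List Int) (out : List (List Int) × List Int × List Int) : Decidable (Spec_findAllNonVariables pattern out) := by unfold Spec_findAllNonVariables; infer_instance

-- ===== CLAIM (what is proved, stated in full; the proofs are below) =====
def Claim_equal_findAllNonVariables : Prop := ∀ (pattern : List Int), Dom_findAllNonVariables pattern → Spec_findAllNonVariables pattern (findAllNonVariables pattern)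

-- ===== LEMMAS AND PROOFS =====

-- canonical description of A's fold: (interior words, trailing run)
def specFold : List Int → List (List Int) × List Int
  | [] => ([], [])
  | c :: t =>
    if isVariable c then specFold (t.dropWhile (fun x => isVariable x))
    else
      if t.dropWhile (fun x => !isVariable x) = [] then
        ([], c :: t.takeWhile (fun x => !isVariable x))
      else
        ((c :: t.takeWhile (fun x => !isVariable x))
            :: (specFold (t.dropWhile (fun x => !isVariable x))).1,
         (specFold (t.dropWhile (fun x => !isVariable x))).2)
termination_by l => l.length
decreasing_by
  · have := List.length_dropWhile_le (fun x => isVariable x) t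
    simp; omega
  · have := List.length_dropWhile_le (fun x => !isVariable x) t
    simp; omega

-- suffix and interior words as read off a run list
def trailG (gs : List (Bool × List Int)) : List Int :=
  match gs.getLast? with | some (false, r) => r | _ => []

def wordsG (gs : List (Bool × List Int)) : List (List Int) :=
  let base : List (Bool × List Int) :=
    match gs.getLast? with | some (false, _) => gs.dropLast | _ => gs
  base.filterMap (fun g => if g.1 then none else some g.2)

-- B's selection step as a function of the run list
def altBody (gs : List (Bool × List Int)) : List (List Int) × List Int × List Int :=
  let pre := match gs.head? with | some (false, r) => r | _ => ([] : List Int)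
  let suf := if 1 < gs.length then
               (match gs.getLast? with | some (false, r) => r | _ => ([] : List Int))
             else []
  let start := if pre.isEmpty then 0 else 1
  let stop := if suf.isEmpty then gs.length else gs.length - 1
  let words := ((gs.drop start).take (stop - start)).filterMap
                 (fun g => if g.1 then none else some g.2)
  (words, pre, suf)

lemma alt_eq_altBody (l : List Int) : findAllNonVariables_alt l = altBody (groupRuns l) := rfl

-- equation lemmas
lemma groupRuns_nil : groupRuns [] = [] := by rw [groupRuns]

lemma groupRuns_cons (c : Int) (t : List Int) :
    groupRuns (c :: t)
      = (isVariable c, c :: t.takeWhile (fun x => isVariable x == isVariable c))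
          :: groupRuns (t.dropWhile (fun x => isVariable x == isVariable c)) := by
  rw [groupRuns]

lemma specFold_nil : specFold [] = ([], []) := by rw [specFold]

lemma specFold_var (c : Int) (t : List Int) (h : isVariable c = true) :
    specFold (c :: t) = specFold (t.dropWhile (fun x => isVariable x)) := by
  rw [specFold, if_pos h]

lemma specFold_nonvar_nil (c : Int) (t : List Int) (h : isVariable c = false)
    (h2 : t.dropWhile (fun x => !isVariable x) = []) :
    specFold (c :: t) = ([], c :: t.takeWhile (fun x => !isVariable x)) := by
  rw [specFold, if_neg (by simp [h]), if_pos h2]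

lemma specFold_nonvar_cons (c : Int) (t : List Int) (h : isVariable c = false)
    (h2 : t.dropWhile (fun x => !isVariable x) ≠ []) :
    specFold (c :: t)
      = ((c :: t.takeWhile (fun x => !isVariable x))
            :: (specFold (t.dropWhile (fun x => !isVariable x))).1,
         (specFold (t.dropWhile (fun x => !isVariable x))).2) := by
  rw [specFold, if_neg (by simp [h]), if_neg h2]

lemma pred_true : (fun x : Int => isVariable x == true) = (fun x : Int => isVariable x) := by
  funext x; cases isVariable x <;> rfl

lemma pred_false : (fun x : Int => isVariable x == false) = (fun x : Int => !isVariable x) := by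
  funext x; cases isVariable x <;> rfl

-- small list facts
lemma getLast?_cons_ne_none {α : Type} (x : α) (t : List α) : (x :: t).getLast? ≠ none := by
  induction t generalizing x with
  | nil => simp
  | cons y u ih => rw [List.getLast?_cons_cons]; exact ih y

lemma getLast?_mem' {α : Type} : ∀ (l : List α) (a : α), l.getLast? = some a → a ∈ l := by
  intro l
  induction l with
  | nil => simp
  | cons x t ih =>
    intro a h
    cases t with
    | nil => simp at h; simp [h]
    | cons y u =>
      rw [List.getLast?_cons_cons] at h
      exact List.mem_cons_of_mem _ (ih a h)

lemma take_len_sub_one {α : Type} : ∀ (l : List α), l.take (l.length - 1) = l.dropLast := by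
  intro l
  induction l with
  | nil => rfl
  | cons a t ih =>
    cases t with
    | nil => rfl
    | cons b u =>
      have h : (a :: b :: u).length - 1 = (b :: u).length - 1 + 1 := by simp
      rw [h, List.take_succ_cons, ih, List.dropLast_cons₂]

lemma isEmpty_false_of_ne {α : Type} (l : List α) (h : l ≠ []) : l.isEmpty = false := by
  cases l with
  | nil => exact absurd rfl h
  | cons a t => rfl

-- trailG / wordsG on small shapes
lemma trailG_nil : trailG [] = [] := rfl

lemma trailG_single (b : Bool) (r : List Int) : trailG [(b, r)] = if b then [] else r := by
  cases b <;> simp [trailG]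

lemma trailG_cons (g : Bool × List Int) (gs : List (Bool × List Int)) (h : gs ≠ []) :
    trailG (g :: gs) = trailG gs := by
  obtain ⟨b, l, rfl⟩ : ∃ b l, gs = b :: l := by
    cases gs with
    | nil => exact absurd rfl h
    | cons b l => exact ⟨b, l, rfl⟩
  simp [trailG, List.getLast?_cons_cons]

lemma wordsG_nil : wordsG [] = [] := rfl

lemma wordsG_single (b : Bool) (r : List Int) : wordsG [(b, r)] = [] := by
  cases b <;> simp [wordsG]

lemma wordsG_cons (b : Bool) (r : List Int) (gs : List (Bool × List Int)) (h : gs ≠ []) :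
    wordsG ((b, r) :: gs) = (if b then [] else [r]) ++ wordsG gs := by
  obtain ⟨g', l, rfl⟩ : ∃ g' l, gs = g' :: l := by
    cases gs with
    | nil => exact absurd rfl h
    | cons g' l => exact ⟨g', l, rfl⟩
  cases hlast : (g' :: l).getLast? with
  | none => exact absurd hlast (getLast?_cons_ne_none g' l)
  | some gl =>
    rcases gl with ⟨bb, rr⟩
    cases bb with
    | true => cases b <;> simp [wordsG, List.getLast?_cons_cons, hlast, List.filterMap_cons]
    | false =>
      cases b <;>
        simp [wordsG, List.getLast?_cons_cons, hlast, List.filterMap_cons, List.dropLast_cons₂]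

lemma dropWhile_head_false {p : Int → Bool} :
    ∀ (l : List Int) (x : Int) (xs : List Int), l.dropWhile p = x :: xs → p x = false := by
  intro l
  induction l with
  | nil => intro x xs h; simp at h
  | cons c t ih =>
    intro x xs h
    rw [List.dropWhile_cons] at h
    by_cases hc : p c = true
    · rw [if_pos hc] at h; exact ih x xs h
    · rw [if_neg hc] at h
      injection h with h1 _
      rw [← h1]
      simpa using hc

-- fold helpers
lemma foldl_run_nonvar : ∀ (run : List Int), (∀ x ∈ run, isVariable x = false) →
    ∀ ws w, run.foldl stepA (ws, w) = (ws, w ++ run) := by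
  intro run
  induction run with
  | nil => intro _ ws w; simp
  | cons c t ih =>
    intro h ws w
    have hc : isVariable c = false := h c (by simp)
    simp only [List.foldl_cons, stepA, hc, Bool.false_eq_true, if_false]
    rw [ih (fun x hx => h x (by simp [hx])) ws (w ++ [c])]
    simp

lemma foldl_run_var : ∀ (run : List Int), (∀ x ∈ run, isVariable x = true) →
    ∀ ws : List (List Int), run.foldl stepA (ws, []) = (ws, []) := by
  intro run
  induction run with
  | nil => intro _ ws; simp
  | cons c t ih =>
    intro h ws
    have hc : isVariable c = true := h c (by simp)
    simp only [List.foldl_cons, stepA, hc, if_true]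
    exact ih (fun x hx => h x (by simp [hx])) ws

-- A's fold computes specFold
lemma foldl_specFold (l : List Int) :
    ∀ ws, l.foldl stepA (ws, []) = (ws ++ (specFold l).1, (specFold l).2) := by
  induction l using specFold.induct with
  | case1 => intro ws; simp [specFold_nil]
  | case2 c t hc ih =>
    intro ws
    have hc' : isVariable c = true := by simpa using hc
    rw [specFold_var c t hc']
    have hsplit : c :: t
        = ((c :: t.takeWhile (fun x => isVariable x)) ++ t.dropWhile (fun x => isVariable x)) := by
      rw [List.cons_append, List.takeWhile_append_dropWhile]
    rw [hsplit, List.foldl_append]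
    have hvar : ∀ x ∈ c :: t.takeWhile (fun x => isVariable x), isVariable x = true := by
      intro x hx
      rcases List.mem_cons.mp hx with h | h
      · rw [h]; exact hc'
      · simpa using List.mem_takeWhile_imp h
    rw [foldl_run_var _ hvar ws]
    exact ih ws
  | case3 c t hc h2 =>
    intro ws
    have hc' : isVariable c = false := by simpa using hc
    have htake : t.takeWhile (fun x => !isVariable x) = t := by
      have h := List.takeWhile_append_dropWhile (p := fun x => !isVariable x) (l := t)
      rw [h2] at h; simpa using h
    rw [specFold_nonvar_nil c t hc' h2]
    have hall : ∀ x ∈ c :: t, isVariable x = false := by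
      intro x hx
      rcases List.mem_cons.mp hx with h | h
      · rw [h]; exact hc'
      · have hx' : x ∈ t.takeWhile (fun x => !isVariable x) := by rw [htake]; exact h
        simpa using List.mem_takeWhile_imp hx'
    rw [foldl_run_nonvar _ hall ws []]
    simp [htake]
  | case4 c t hc h2 ih =>
    intro ws
    have hc' : isVariable c = false := by simpa using hc
    rw [specFold_nonvar_cons c t hc' h2]
    obtain ⟨d, t'', hd⟩ : ∃ d t'', t.dropWhile (fun x => !isVariable x) = d :: t'' := by
      cases h : t.dropWhile (fun x => !isVariable x) with
      | nil => exact absurd h h2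
      | cons d t'' => exact ⟨d, t'', rfl⟩
    have hdvar : isVariable d = true := by
      have h := dropWhile_head_false t d t'' hd
      simpa using h
    have hsplit : c :: t
        = ((c :: t.takeWhile (fun x => !isVariable x)) ++ t.dropWhile (fun x => !isVariable x)) := by
      rw [List.cons_append, List.takeWhile_append_dropWhile]
    have hrun : ∀ x ∈ c :: t.takeWhile (fun x => !isVariable x), isVariable x = false := by
      intro x hx
      rcases List.mem_cons.mp hx with h | h
      · rw [h]; exact hc'
      · simpa using List.mem_takeWhile_imp h
    conv_lhs => rw [hsplit]
    rw [List.foldl_append, foldl_run_nonvar _ hrun ws [], hd, List.foldl_cons]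
    have hstep : stepA (ws, [] ++ (c :: t.takeWhile (fun x => !isVariable x))) d
        = (ws ++ [c :: t.takeWhile (fun x => !isVariable x)], []) := by
      simp [stepA, hdvar]
    rw [hstep]
    have hh := ih (ws ++ [c :: t.takeWhile (fun x => !isVariable x)])
    rw [hd, List.foldl_cons] at hh
    have hskip : stepA (ws ++ [c :: t.takeWhile (fun x => !isVariable x)], []) d
        = (ws ++ [c :: t.takeWhile (fun x => !isVariable x)], []) := by
      simp [stepA, hdvar]
    rw [hskip] at hh
    rw [hh]
    simp

-- every run produced by groupRuns is nonempty
lemma groupRuns_run_ne_nil : ∀ (l : List Int) (g : Bool × List Int), g ∈ groupRuns l → g.2 ≠ [] := by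
  intro l
  induction l using groupRuns.induct with
  | case1 => intro g hg; rw [groupRuns_nil] at hg; simp at hg
  | case2 c t ih =>
    intro g hg
    rw [groupRuns_cons] at hg
    rcases List.mem_cons.mp hg with h | h
    · rw [h]; simp
    · exact ih g h

-- specFold read off the run list
lemma specFold_eq_groups : ∀ (l : List Int),
    specFold l = (wordsG (groupRuns l), trailG (groupRuns l)) := by
  intro l
  induction l using groupRuns.induct with
  | case1 => rw [groupRuns_nil, specFold_nil, wordsG_nil, trailG_nil]
  | case2 c t ih =>
    rw [groupRuns_cons]
    cases hc : isVariable c with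
    | true =>
      rw [hc] at ih
      rw [pred_true] at ih ⊢
      rw [specFold_var c t hc, ih]
      cases hgs : groupRuns (t.dropWhile fun x => isVariable x) with
      | nil => simp [wordsG_nil, trailG_nil, wordsG_single, trailG_single]
      | cons g l' =>
        conv_rhs => rw [wordsG_cons true _ _ (List.cons_ne_nil g l'),
                        trailG_cons _ _ (List.cons_ne_nil g l')]
        simp
    | false =>
      rw [hc] at ih
      rw [pred_false] at ih ⊢
      cases ht' : t.dropWhile (fun x => !isVariable x) with
      | nil =>
        rw [specFold_nonvar_nil c t hc ht', groupRuns_nil]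
        simp [wordsG_single, trailG_single]
      | cons d t'' =>
        rw [ht'] at ih
        rw [specFold_nonvar_cons c t hc (by rw [ht']; simp), ht']
        rw [ih]
        have hne : groupRuns (d :: t'') ≠ [] := by rw [groupRuns_cons]; simp
        rw [wordsG_cons false _ _ hne, trailG_cons _ _ hne]
        simp

-- A characterized
lemma pvPrefixA_eq (l : List Int) : pvPrefixA l = l.takeWhile (fun x => !isVariable x) := by
  induction l with
  | nil => rfl
  | cons c t ih =>
    rw [pvPrefixA, List.takeWhile_cons]
    cases h : isVariable c <;> simp [ih]

lemma drop_takeWhile (p : Int → Bool) (l : List Int) :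
    l.drop (l.takeWhile p).length = l.dropWhile p := by
  induction l with
  | nil => rfl
  | cons c t ih =>
    by_cases h : p c = true <;>
      simp [List.takeWhile_cons, List.dropWhile_cons, h, ih]

lemma A_char (l : List Int) :
    findAllNonVariables l
      = ((specFold (l.dropWhile (fun x => !isVariable x))).1,
         l.takeWhile (fun x => !isVariable x),
         (specFold (l.dropWhile (fun x => !isVariable x))).2) := by
  have hbody : findAllNonVariables l
      = (((l.drop (pvPrefixA l).length).foldl stepA ([], [])).1, pvPrefixA l,
         ((l.drop (pvPrefixA l).length).foldl stepA ([], [])).2) := rfl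
  rw [hbody, pvPrefixA_eq, drop_takeWhile, foldl_specFold _ []]
  simp

-- B's selection on a run list headed by a variable run
lemma altBody_true (run : List Int) (rest : List (Bool × List Int))
    (hruns : ∀ p ∈ rest, p.2 ≠ []) :
    altBody ((true, run) :: rest) = (wordsG rest, [], trailG rest) := by
  cases rest with
  | nil => simp [altBody, wordsG_nil, trailG_nil]
  | cons g l' =>
    cases hlast : (g :: l').getLast? with
    | none => exact absurd hlast (getLast?_cons_ne_none g l')
    | some p =>
      rcases p with ⟨b, r⟩
      have hgt : 1 < l'.length + 1 + 1 := by omega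
      cases b with
      | true =>
        have h1 : trailG (g :: l') = [] := by simp [trailG, hlast]
        have h2 : wordsG (g :: l')
            = (g :: l').filterMap (fun q => if q.1 then none else some q.2) := by
          simp [wordsG, hlast]
        simp [altBody, List.getLast?_cons_cons, hlast, h1, h2, hgt, List.filterMap_cons]
      | false =>
        have hr : r ≠ [] := hruns (false, r) (getLast?_mem' _ _ hlast)
        have hre : r.isEmpty = false := isEmpty_false_of_ne r hr
        have h1 : trailG (g :: l') = r := by simp [trailG, hlast]
        have h2 : wordsG (g :: l')
            = (g :: l').dropLast.filterMap (fun q => if q.1 then none else some q.2) := by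
          simp [wordsG, hlast]
        have htd : List.take l'.length (g :: l') = (g :: l').dropLast := by
          have hl : l'.length = (g :: l').length - 1 := by simp
          rw [hl, take_len_sub_one]
        simp [altBody, List.getLast?_cons_cons, hlast, h1, h2, hgt, hre, htd,
              List.take_succ_cons, List.filterMap_cons]

-- B's selection on a run list headed by a non-variable run
lemma altBody_false (run : List Int) (hrun : run ≠ []) (rest : List (Bool × List Int))
    (hruns : ∀ p ∈ rest, p.2 ≠ []) :
    altBody ((false, run) :: rest) = (wordsG rest, run, trailG rest) := by
  have hrunE : run.isEmpty = false := isEmpty_false_of_ne run hrun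
  cases rest with
  | nil => simp [altBody, wordsG_nil, trailG_nil, hrunE]
  | cons g l' =>
    cases hlast : (g :: l').getLast? with
    | none => exact absurd hlast (getLast?_cons_ne_none g l')
    | some p =>
      rcases p with ⟨b, r⟩
      have hgt : 1 < l'.length + 1 + 1 := by omega
      cases b with
      | true =>
        have h1 : trailG (g :: l') = [] := by simp [trailG, hlast]
        have h2 : wordsG (g :: l')
            = (g :: l').filterMap (fun q => if q.1 then none else some q.2) := by
          simp [wordsG, hlast]
        have harith : l'.length + 1 + 1 - 1 = l'.length + 1 := by omega
        simp [altBody, List.getLast?_cons_cons, hlast, h1, h2, hgt, hrunE, harith,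
              List.filterMap_cons]
      | false =>
        have hr : r ≠ [] := hruns (false, r) (getLast?_mem' _ _ hlast)
        have hre : r.isEmpty = false := isEmpty_false_of_ne r hr
        have h1 : trailG (g :: l') = r := by simp [trailG, hlast]
        have h2 : wordsG (g :: l')
            = (g :: l').dropLast.filterMap (fun q => if q.1 then none else some q.2) := by
          simp [wordsG, hlast]
        have htd : List.take l'.length (g :: l') = (g :: l').dropLast := by
          have hl : l'.length = (g :: l').length - 1 := by simp
          rw [hl, take_len_sub_one]
        simp [altBody, List.getLast?_cons_cons, hlast, h1, h2, hgt, hrunE, hre, htd,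
              List.filterMap_cons]

-- the equivalence
lemma main_eq (l : List Int) : findAllNonVariables l = findAllNonVariables_alt l := by
  rw [A_char l, alt_eq_altBody l]
  cases l with
  | nil =>
    rw [groupRuns_nil]
    simp [specFold_nil, altBody, trailG_nil]
  | cons c t =>
    rw [groupRuns_cons]
    cases hc : isVariable c with
    | true =>
      rw [pred_true]
      rw [altBody_true _ _ (fun p hp => groupRuns_run_ne_nil _ p hp)]
      have h1 : List.dropWhile (fun x => !isVariable x) (c :: t) = c :: t := by
        simp [List.dropWhile_cons, hc]
      have h2 : List.takeWhile (fun x => !isVariable x) (c :: t) = [] := by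
        simp [List.takeWhile_cons, hc]
      rw [h1, h2, specFold_var c t hc, specFold_eq_groups]
    | false =>
      rw [pred_false]
      rw [altBody_false _ (by simp) _ (fun p hp => groupRuns_run_ne_nil _ p hp)]
      have h1 : List.dropWhile (fun x => !isVariable x) (c :: t)
          = t.dropWhile (fun x => !isVariable x) := by
        simp [List.dropWhile_cons, hc]
      have h2 : List.takeWhile (fun x => !isVariable x) (c :: t)
          = c :: t.takeWhile (fun x => !isVariable x) := by
        simp [List.takeWhile_cons, hc]
      rw [h1, h2, specFold_eq_groups]

-- ===== VERDICT (by name: the statement is the Claim_ definition above) =====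
theorem findAllNonVariables_spec : Claim_equal_findAllNonVariables := by
  intro pattern _
  unfold Spec_findAllNonVariables
  exact main_eq pattern
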